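-- pv_equiv track=rewrite | github.com/Logistic98/blog-rag | data_process/build_index.py | batch_generator
-- ===== SOURCE A (Python) =====
-- def batch_generator(iterable, batch_size):
--     """生成器函数，将可迭代对象分批次返回。"""
--     batch = []
--     for item in iterable:
--         batch.append(item)
--         if len(batch) == batch_size:
--             yield batch
--             batch = []
--     if batch:
--         yield batch
-- ===== SOURCE B (Python) =====
-- from itertools import islice
--
-- def batch_generator(iterable, batch_size):
--     """生成器函数，将可迭代对象分批次返回。"""
--     it = iter(iterable)
--     while True:
--         chunk = list(islice(it, batch_size))
--         if not chunk:
--             break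
--         yield chunk
-- ===== Notes on version B (the rewrite author's own statement) =====
-- stated objective: idiomatic
-- what changed: Instead of appending items one at a time into a buffer and checking its length, B wraps the input in an iterator and pulls whole fixed-size chunks with itertools.islice until the iterator is exhausted.
-- outside the precondition, e.g. on batch_generator([1, 2], 0): A returns [[1, 2]], B returns []; on batch_generator([1], -1): A returns [[1]], B raises ValueError
import Mathlib
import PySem

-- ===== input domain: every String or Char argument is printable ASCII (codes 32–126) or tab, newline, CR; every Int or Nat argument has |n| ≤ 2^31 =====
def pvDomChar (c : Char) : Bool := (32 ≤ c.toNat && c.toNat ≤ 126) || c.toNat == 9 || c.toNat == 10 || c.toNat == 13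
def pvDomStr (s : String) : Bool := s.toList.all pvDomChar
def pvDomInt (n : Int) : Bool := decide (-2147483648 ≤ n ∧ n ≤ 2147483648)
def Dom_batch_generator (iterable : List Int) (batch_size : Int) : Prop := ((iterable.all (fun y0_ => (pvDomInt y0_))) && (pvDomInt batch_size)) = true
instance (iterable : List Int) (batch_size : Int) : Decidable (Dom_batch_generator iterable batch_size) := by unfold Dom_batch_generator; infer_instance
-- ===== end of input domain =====

-- B replaces A's item-by-item buffer with islice chunk pulls (idiomatic decomposition, same O(n) cost);
-- equivalence is about the list of yielded batches (both generators are fully consumed).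

-- ===== PORT A =====
-- the for-loop of A: `batch` is the buffer, a batch is yielded when its length reaches batch_size,
-- and a nonempty leftover buffer is yielded at the end
def batchLoopA (batch_size : Int) (batch : List Int) : List Int → List (List Int)
  | [] => if batch.isEmpty then [] else [batch]
  | item :: rest =>
      let b := batch ++ [item]
      if (b.length : Int) = batch_size then b :: batchLoopA batch_size [] rest
      else batchLoopA batch_size b rest

def batch_generator (iterable : List Int) (batch_size : Int) : List (List Int) :=
  batchLoopA batch_size [] iterable

-- ===== PORT B =====
-- the while-loop of B: pull a chunk of batch_size items off the front (list(islice(it, batch_size))),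
-- stop when the chunk is empty
def batchLoopB (n : Nat) (l : List Int) : List (List Int) :=
  if (l.take n).isEmpty then [] else l.take n :: batchLoopB n (l.drop n)
termination_by l.length
decreasing_by
  rename_i h
  have h1 : l ≠ [] := by intro hh; simp [hh] at h
  have h2 : n ≠ 0 := by intro hh; simp [hh] at h
  have h3 : 1 ≤ l.length := List.length_pos_iff.mpr h1
  simp only [List.length_drop]
  omega

def batch_generator_alt (iterable : List Int) (batch_size : Int) : List (List Int) :=
  batchLoopB batch_size.toNat iterable

-- ===== PRECONDITION & SPEC =====
-- Pre_ excludes non-positive batch_size: batching makes no sense there and the corner is an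
-- implementation accident on both sides — A's length test never fires so A returns the whole input
-- as one final batch, while B's islice yields nothing for 0 and raises ValueError for negative sizes.
def Pre_batch_generator (iterable : List Int) (batch_size : Int) : Prop := 1 ≤ batch_size
instance (iterable : List Int) (batch_size : Int) : Decidable (Pre_batch_generator iterable batch_size) := by unfold Pre_batch_generator; infer_instance
def pvWitness_batch_generator : List Int × Int := ([1, 2, 3, 4, 5], 2)

def Spec_batch_generator (iterable : List Int) (batch_size : Int) (out : List (List Int)) : Prop := out = batch_generator_alt iterable batch_size
instance (iterable : List Int) (batch_size : Int) (out : List (List Int)) : Decidable (Spec_batch_generator iterable batch_size out) := by unfold Spec_batch_generator; infer_instance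

-- ===== CLAIM (what is proved, stated in full; the proofs are below) =====
def Claim_equal_batch_generator : Prop := ∀ (iterable : List Int) (batch_size : Int), Dom_batch_generator iterable batch_size → Pre_batch_generator iterable batch_size → Spec_batch_generator iterable batch_size (batch_generator iterable batch_size)

-- ===== LEMMAS AND PROOFS =====

theorem batchLoopB_nil (n : Nat) : batchLoopB n [] = [] := by
  rw [batchLoopB]; simp

-- invariant: when the buffer is strictly shorter than the (positive) batch size,
-- A's loop on `l` with buffer `batch` produces exactly B's chunks of `batch ++ l`
theorem loop_agree (n : Nat) (hn : 1 ≤ n) (l batch : List Int)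
    (hb : batch.length < n) :
    batchLoopA (n : Int) batch l = batchLoopB n (batch ++ l) := by
  induction l generalizing batch with
  | nil =>
    simp only [List.append_nil, batchLoopA]
    by_cases h : batch = []
    · subst h; simp [batchLoopB_nil]
    · rw [batchLoopB]
      have ht : batch.take n = batch := List.take_of_length_le (by omega)
      have hd : batch.drop n = [] := List.drop_eq_nil_of_le (by omega)
      simp [ht, hd, h, batchLoopB_nil]
  | cons x xs ih =>
    simp only [batchLoopA]
    set b := batch ++ [x] with hbdef
    have hblen : b.length = batch.length + 1 := by simp [hbdef]
    by_cases hfull : (b.length : Int) = (n : Int)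
    · have hbn : b.length = n := by exact_mod_cast hfull
      rw [if_pos hfull, ih [] (by simp; omega)]
      have hre : batch ++ x :: xs = b ++ xs := by simp [hbdef]
      have ht : (b ++ xs).take n = b := by
        rw [List.take_append_of_le_length (by omega)]
        exact List.take_of_length_le (by omega)
      have hd : (b ++ xs).drop n = xs := by
        rw [List.drop_append_of_le_length (by omega)]
        simp [hbn]
      have hbne : ¬ b.isEmpty = true := by
        simp only [List.isEmpty_iff]
        intro h; rw [h] at hbn; simp at hbn; omega
      rw [hre]
      conv_rhs => rw [batchLoopB]
      rw [ht, hd, if_neg hbne]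
      simp
    · rw [if_neg hfull]
      have hlt : b.length < n := by
        have : (b.length : Int) ≠ (n : Int) := hfull
        omega
      rw [ih b hlt]
      congr 1
      simp [hbdef]

-- ===== VERDICT (by name: the statement is the Claim_ definition above) =====
theorem batch_generator_spec : Claim_equal_batch_generator := by
  intro iterable batch_size _ hpre
  unfold Spec_batch_generator batch_generator batch_generator_alt
  have h1 : 1 ≤ batch_size.toNat := by unfold Pre_batch_generator at hpre; omega
  have hcast : ((batch_size.toNat : Int)) = batch_size := by
    unfold Pre_batch_generator at hpre; omega
  have h := loop_agree batch_size.toNat h1 iterable [] (by simp; omega)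
  rw [hcast] at h
  simpa using h
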